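-- pv_equiv track=rewrite | github.com/ellismckenzielee/codewars-python | simple_fun_160_cut_the_ropes.py | cut_the_ropes
-- ===== SOURCE A (Python) =====
-- def cut_the_ropes(arr):
--     remaining_list = [len(arr)]
--
--     for num in arr:
--         minimum = min(arr)
--         arr = list(map(lambda x: x-minimum, arr))
--         remaining = len(arr) - arr.count(0)
--         arr = list(filter(lambda x: x != 0, arr))
--         if remaining == 0:
--             return remaining_list
--         remaining_list.append(remaining)
-- ===== SOURCE B (Python) =====
-- def cut_the_ropes(arr):
--     s = sorted(arr)
--     n = len(s)
--     res = [n]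
--     rem = n
--     for prev, cur in zip(s, s[1:]):
--         rem -= 1
--         if cur != prev:
--             res.append(rem)
--     return res
-- ===== Notes on version B (the rewrite author's own statement) =====
-- stated objective: faster
-- what changed: A repeatedly rescans the whole list (min, subtract, count, filter) once per distinct value; B sorts once and emits, at each place where adjacent sorted values differ, the number of elements after that place.
-- outside the precondition, e.g. on cut_the_ropes([]): A returns None, B returns [0]
import Mathlib
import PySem

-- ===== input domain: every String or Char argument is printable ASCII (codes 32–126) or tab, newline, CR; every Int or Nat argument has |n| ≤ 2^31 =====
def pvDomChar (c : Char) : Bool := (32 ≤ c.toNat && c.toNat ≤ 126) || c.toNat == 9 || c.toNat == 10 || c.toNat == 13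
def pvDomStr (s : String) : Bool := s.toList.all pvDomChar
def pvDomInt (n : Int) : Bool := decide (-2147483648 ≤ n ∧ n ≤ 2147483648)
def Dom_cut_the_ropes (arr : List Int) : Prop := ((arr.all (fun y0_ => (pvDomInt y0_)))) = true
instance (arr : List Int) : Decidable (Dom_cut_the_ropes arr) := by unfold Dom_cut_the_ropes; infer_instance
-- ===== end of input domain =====

-- B sorts once and reads the answers off adjacent differences instead of A's repeated
-- min/subtract/count/filter rescans.

-- ===== PORT A =====
def cutA_loop (fuel cur acc : List Int) : List Int :=
  match fuel with
  | [] => acc          -- Python falls off the loop and returns None; unreachable under Pre_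
  | _ :: rest =>
    match PySem.List.min? cur (fun x => x) with
    | none => acc      -- min([]) would raise; unreachable under Pre_
    | some m =>
      let cur2 := cur.map (fun x => x - m)
      let remaining : Int := (cur2.length : Int) - (PySem.List.count cur2 0 : Int)
      let cur3 := cur2.filter (fun x => x != 0)
      if remaining = 0 then acc
      else cutA_loop rest cur3 (acc ++ [remaining])

def cut_the_ropes (arr : List Int) : List Int :=
  cutA_loop arr arr [(arr.length : Int)]

-- ===== PORT B =====
def cut_the_ropes_alt (arr : List Int) : List Int :=
  let s := PySem.List.sorted arr (fun x => x)
  let n : Int := (s.length : Int)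
  ((s.zip (PySem.List.slice s (some 1) none)).foldl
    (fun (st : List Int × Int) (pc : Int × Int) =>
      let rem := st.2 - 1
      if pc.2 ≠ pc.1 then (st.1 ++ [rem], rem) else (st.1, rem))
    ([n], n)).1

-- ===== PRECONDITION & SPEC =====
-- Pre_ excludes only the empty list, on which A falls off its loop and returns None (not a list of ints).
def Pre_cut_the_ropes (arr : List Int) : Prop := arr ≠ []
instance (arr : List Int) : Decidable (Pre_cut_the_ropes arr) := by unfold Pre_cut_the_ropes; infer_instance
def pvWitness_cut_the_ropes : List Int := [1, 2]

def Spec_cut_the_ropes (arr : List Int) (out : List Int) : Prop := out = cut_the_ropes_alt arr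
instance (arr : List Int) (out : List Int) : Decidable (Spec_cut_the_ropes arr out) := by unfold Spec_cut_the_ropes; infer_instance

-- ===== CLAIM (what is proved, stated in full; the proofs are below) =====
def Claim_equal_cut_the_ropes : Prop := ∀ (arr : List Int), Dom_cut_the_ropes arr → Pre_cut_the_ropes arr → Spec_cut_the_ropes arr (cut_the_ropes arr)

-- ===== LEMMAS AND PROOFS =====

-- the minimum VALUE is determined by membership + lower-boundedness (min? picks the first witness, but over Int the value is unique)
theorem min?_id_eq_of {l : List Int} {m : Int} (hm : m ∈ l) (hmin : ∀ y ∈ l, m ≤ y) :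
    PySem.List.min? l (fun x => x) = some m := by
  cases h : PySem.List.min? l (fun x => x) with
  | none =>
      rw [PySem.List.min?_eq_none_iff] at h
      simp [h] at hm
  | some m' =>
      have h1 : m' ≤ m := PySem.List.min?_isMin h m hm
      have h2 : m ≤ m' := hmin m' (PySem.List.min?_mem h)
      exact congrArg some (le_antisymm h1 h2)

-- the cut list is strictly shorter (the minimum itself becomes 0 and is filtered out)
theorem filter_length_lt {cur : List Int} {m : Int}
    (h : PySem.List.min? cur (fun x => x) = some m) :
    ((cur.map (fun x => x - m)).filter (fun x => x != 0)).length < cur.length := by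
  have hmem : (0 : Int) ∈ cur.map (fun x => x - m) :=
    List.mem_map.mpr ⟨m, PySem.List.min?_mem h, by ring⟩
  have h2 : ((cur.map (fun x => x - m)).filter (fun x => x != 0)).length < (cur.map (fun x => x - m)).length := by
    apply List.length_filter_lt_length_iff_exists.mpr
    exact ⟨0, hmem, by simp⟩
  simpa using h2

-- A's loop re-expressed as a recursion on the shrinking list (used only by the proofs)
def countsList (cur : List Int) : List Int :=
  match h : PySem.List.min? cur (fun x => x) with
  | none => []
  | some m =>
    let cur2 := cur.map (fun x => x - m)
    let remaining : Int := (cur2.length : Int) - (PySem.List.count cur2 0 : Int)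
    let cur3 := cur2.filter (fun x => x != 0)
    if remaining = 0 then [] else remaining :: countsList cur3
termination_by cur.length
decreasing_by simpa using filter_length_lt h

theorem countsList_nil : countsList [] = [] := by
  rw [countsList.eq_def]
  simp [PySem.List.min?]

theorem countsList_some {cur : List Int} {m : Int}
    (h : PySem.List.min? cur (fun x => x) = some m) :
    countsList cur =
      (if ((cur.map (fun x => x - m)).length : Int) - (PySem.List.count (cur.map (fun x => x - m)) 0 : Int) = 0 then []
       else (((cur.map (fun x => x - m)).length : Int) - (PySem.List.count (cur.map (fun x => x - m)) 0 : Int)) ::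
         countsList ((cur.map (fun x => x - m)).filter (fun x => x != 0))) := by
  rw [countsList.eq_def, h]

-- a duplicated minimum at the head only adds one more zero, which the cut removes
theorem countsList_cons_min {l : List Int} {m : Int}
    (h : PySem.List.min? l (fun x => x) = some m) :
    countsList (m :: l) = countsList l := by
  have hm : PySem.List.min? (m :: l) (fun x => x) = some m := by
    apply min?_id_eq_of List.mem_cons_self
    intro y hy
    rcases List.mem_cons.mp hy with h' | h'
    · omega
    · exact PySem.List.min?_isMin h y h'
  rw [countsList_some hm, countsList_some h]
  simp only [List.map_cons, show m - m = 0 by ring, List.filter_cons, PySem.List.count_eq,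
    List.count_cons, List.length_cons, bne_self_eq_false, Bool.false_eq_true, if_false,
    beq_self_eq_true, if_true]
  have hc : ((((l.map (fun x => x - m)).length + 1 : ℕ) : Int) - ((List.count (0:Int) (l.map (fun x => x - m)) + 1 : ℕ) : Int)) = (((l.map (fun x => x - m)).length : ℕ) : Int) - ((List.count (0:Int) (l.map (fun x => x - m)) : ℕ) : Int) := by push_cast; ring
  rw [hc]

theorem cutA_loop_eq (fuel : List Int) : ∀ (cur acc : List Int), cur.length ≤ fuel.length →
    cutA_loop fuel cur acc = acc ++ countsList cur := by
  induction fuel with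
  | nil =>
      intro cur acc hlen
      have : cur = [] := List.length_eq_zero_iff.mp (Nat.le_zero.mp hlen)
      subst this
      simp [cutA_loop, countsList_nil]
  | cons f rest ih =>
      intro cur acc hlen
      rw [cutA_loop]
      cases h : PySem.List.min? cur (fun x => x) with
      | none =>
          rw [PySem.List.min?_eq_none_iff] at h
          subst h
          simp [countsList_nil]
      | some m =>
          rw [countsList_some h]
          simp only
          split
          · simp
          · rw [ih _ _ (by have := filter_length_lt h; simp only [List.length_cons] at hlen; omega)]
            simp

theorem countsList_perm : ∀ (n : ℕ) (l l' : List Int), l.length ≤ n → l.Perm l' →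
    countsList l = countsList l' := by
  intro n
  induction n with
  | zero =>
      intro l l' hlen hp
      have : l = [] := List.length_eq_zero_iff.mp (Nat.le_zero.mp hlen)
      subst this
      rw [hp.nil_eq]
  | succ k ih =>
      intro l l' hlen hp
      cases h : PySem.List.min? l' (fun x => x) with
      | none =>
          rw [PySem.List.min?_eq_none_iff] at h
          subst h
          rw [hp.eq_nil]
      | some m =>
          have hmin : PySem.List.min? l (fun x => x) = some m :=
            min?_id_eq_of (hp.mem_iff.mpr (PySem.List.min?_mem h))
              (fun y hy => PySem.List.min?_isMin h y (hp.mem_iff.mp hy))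
          rw [countsList_some hmin, countsList_some h]
          have hp2 : (l.map (fun x => x - m)).Perm (l'.map (fun x => x - m)) := hp.map _
          have hlen2 : (l.map (fun x => x - m)).length = (l'.map (fun x => x - m)).length :=
            hp2.length_eq
          have hcnt : PySem.List.count (l.map (fun x => x - m)) 0 =
              PySem.List.count (l'.map (fun x => x - m)) 0 := by
            rw [PySem.List.count_eq, PySem.List.count_eq, hp2.count_eq]
          have hp3 : ((l.map (fun x => x - m)).filter (fun x => x != 0)).Perm
              ((l'.map (fun x => x - m)).filter (fun x => x != 0)) := hp2.filter _
          have hlt : ((l.map (fun x => x - m)).filter (fun x => x != 0)).length ≤ k := by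
            have := filter_length_lt hmin; omega
          have hrec := ih ((l.map (fun x => x - m)).filter (fun x => x != 0))
            ((l'.map (fun x => x - m)).filter (fun x => x != 0)) hlt hp3
          rw [hlen2, hcnt, hrec]

-- cutting shifts all values by the minimum; countsList is invariant under a uniform shift
theorem countsList_shift (l : List Int) (c : Int) :
    countsList (l.map (fun x => x - c)) = countsList l := by
  cases h : PySem.List.min? l (fun x => x) with
  | none =>
      rw [PySem.List.min?_eq_none_iff] at h
      subst h
      simp
  | some m =>
      have hmin : PySem.List.min? (l.map (fun x => x - c)) (fun x => x) = some (m - c) := by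
        apply min?_id_eq_of (List.mem_map.mpr ⟨m, PySem.List.min?_mem h, rfl⟩)
        intro y hy
        obtain ⟨x, hx, rfl⟩ := List.mem_map.mp hy
        have := PySem.List.min?_isMin h x hx
        omega
      rw [countsList_some hmin, countsList_some h]
      simp only [List.map_map]
      have hcomp : ((fun x => x - (m - c)) ∘ fun x => x - c) = (fun x => x - m) := by
        funext x; simp only [Function.comp_apply]; ring
      rw [hcomp]

-- B's fold over zip(s, s[1:]) as a structural recursion
def gList (r : Int) : List Int → List Int
  | a :: b :: t => if b ≠ a then (r - 1) :: gList (r - 1) (b :: t) else gList (r - 1) (b :: t)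
  | _ => []

theorem foldl_zip_eq (s : List Int) : ∀ (acc : List Int) (r : Int),
    ((s.zip s.tail).foldl
      (fun (st : List Int × Int) (pc : Int × Int) =>
        let rem := st.2 - 1
        if pc.2 ≠ pc.1 then (st.1 ++ [rem], rem) else (st.1, rem))
      (acc, r)).1 = acc ++ gList r s := by
  induction s with
  | nil => intro acc r; simp [gList]
  | cons a s' ih =>
      intro acc r
      cases s' with
      | nil => simp [gList]
      | cons b t =>
          simp only [List.tail_cons, List.zip_cons_cons, List.foldl_cons]
          by_cases hba : b = a
          · subst hba
            rw [show (if (b : Int) ≠ b then (acc ++ [r - 1], r - 1) else (acc, r - 1)) = (acc, r - 1) by simp]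
            rw [show (List.zip (b :: t) t) = ((b :: t).zip (b :: t).tail) by simp]
            rw [ih acc (r - 1)]
            simp [gList]
          · rw [show (if (b : Int) ≠ a then (acc ++ [r - 1], r - 1) else (acc, r - 1)) = (acc ++ [r - 1], r - 1) by simp [hba]]
            rw [show (List.zip (b :: t) t) = ((b :: t).zip (b :: t).tail) by simp]
            rw [ih (acc ++ [r - 1]) (r - 1)]
            simp [gList, hba]

-- on a sorted list, B's adjacent-difference scan computes exactly A's remaining-counts
theorem gList_eq_countsList : ∀ (s : List Int), s.Pairwise (· ≤ ·) →
    gList (s.length : Int) s = countsList s := by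
  intro s
  induction s with
  | nil => intro _; simp [gList, countsList_nil]
  | cons a s' ih =>
      intro hpw
      have hpw' := List.pairwise_cons.mp hpw
      cases s' with
      | nil =>
          rw [countsList_some (min?_id_eq_of (List.mem_singleton.mpr rfl)
            (by intro y hy; simp at hy; omega))]
          simp [gList, PySem.List.count_eq]
      | cons b t =>
          have hmin : PySem.List.min? (a :: b :: t) (fun x => x) = some a := by
            apply min?_id_eq_of List.mem_cons_self
            intro y hy
            rcases List.mem_cons.mp hy with h | h
            · omega
            · exact hpw'.1 y h
          have hIH := ih hpw'.2
          by_cases hba : b = a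
          · subst hba
            -- both sides step over the duplicated head
            have hminT : PySem.List.min? (b :: t) (fun x => x) = some b := by
              apply min?_id_eq_of List.mem_cons_self
              intro y hy
              rcases List.mem_cons.mp hy with h | h
              · omega
              · exact hpw'.1 y (List.mem_cons_of_mem _ h)
            rw [gList]
            simp only [ne_eq, not_true_eq_false, if_false]
            have harg : (((b : Int) :: b :: t).length : Int) - 1 = ((b :: t).length : Int) := by
              simp
            rw [harg, hIH, countsList_cons_min hminT]
          · -- strict increase: a < b ≤ every element of t
            have hab : a < b := lt_of_le_of_ne (hpw'.1 b List.mem_cons_self) (Ne.symm hba)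
            have htgt : ∀ x ∈ t, a < x := fun x hx =>
              lt_of_lt_of_le hab ((List.pairwise_cons.mp hpw'.2).1 x hx)
            rw [gList, countsList_some hmin]
            simp only [ne_eq, hba, not_false_eq_true, if_true]
            have hcnt : PySem.List.count ((a :: b :: t).map (fun x => x - a)) 0 = 1 := by
              rw [PySem.List.count_eq]
              simp only [List.map_cons, List.count_cons]
              rw [show a - a = 0 by ring]
              have hz : List.count (0 : Int) (t.map (fun x => x - a)) = 0 := by
                rw [List.count_eq_zero]
                intro hc
                obtain ⟨x, hx, hx0⟩ := List.mem_map.mp hc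
                have := htgt x hx; omega
              simp [hz]
              omega
            have hfil : ((a :: b :: t).map (fun x => x - a)).filter (fun x => x != 0) =
                (b :: t).map (fun x => x - a) := by
              simp only [List.map_cons, show a - a = 0 by ring, List.filter_cons,
                bne_self_eq_false, Bool.false_eq_true, if_false]
              rw [if_pos (show ((b - a != 0) = true) by simp; omega)]
              congr 1
              apply List.filter_eq_self.mpr
              intro x hx
              obtain ⟨y, hy, rfl⟩ := List.mem_map.mp hx
              have := htgt y hy
              simp; omega
            rw [hcnt, hfil, countsList_shift]
            have harg : ((a :: b :: t).length : Int) - 1 = ((b :: t).length : Int) := by simp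
            have hcond : ((((a :: b :: t).map (fun x => x - a)).length : ℕ) : Int) - ((1 : ℕ) : Int)
                = ((b :: t).length : Int) := by simp
            rw [harg, hcond, hIH, if_neg (by simp; omega)]

-- ===== VERDICT (by name: the statement is the Claim_ definition above) =====
theorem cut_the_ropes_spec : Claim_equal_cut_the_ropes := by
  intro arr _ hpre
  unfold Spec_cut_the_ropes cut_the_ropes
  simp only [cut_the_ropes_alt, PySem.List.slice_from_one]
  rw [cutA_loop_eq arr arr _ le_rfl, foldl_zip_eq]
  have hperm := PySem.List.sorted_perm arr (fun x => x) false
  rw [countsList_perm arr.length arr (PySem.List.sorted arr (fun x => x)) le_rfl hperm.symm,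
    ← gList_eq_countsList _ (by simpa using PySem.List.sorted_pairwise arr (fun x => x)),
    PySem.List.length_sorted]
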